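-- pv_equiv track=rewrite | github.com/Mgobeaalcoba/python_fundamentals | Programación 1 - Verano 2021/Ejercicio 2 TP 3.py | crearmatrizf
-- ===== SOURCE A (Python) =====
-- def crearmatrizf(filas,columnas):
--     matriz=[]
--     for f in range(filas):
--         matriz.append([0]*columnas)
--     aux=1
--     c=-1
--     for f in range(filas):
--         while c >= columnas*-1:
--             if abs(c) <= (f+1):
--                 matriz[f][c]=aux
--                 aux += 1
--             c -= 1
--         c = -1
--     return matriz
-- ===== SOURCE B (Python) =====
-- def crearmatrizf(filas, columnas):
--     if columnas <= 0:
--         return [[] for _ in range(filas)]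
--
--     def fila(f):
--         if f < columnas:
--             k = f + 1
--             start = 1 + f * (f + 1) // 2
--         else:
--             k = columnas
--             start = 1 + columnas * (columnas + 1) // 2 + (f - columnas) * columnas
--         return [0] * (columnas - k) + list(range(start + k - 1, start - 1, -1))
--
--     return [fila(f) for f in range(filas)]
-- ===== Notes on version B (the rewrite author's own statement) =====
-- stated objective: simpler
-- what changed: Replaces the zero-initialisation pass plus the shared aux counter and negative-index while-loop with a per-row closed form: each row is built wholesale as zero padding followed by a descending range whose start is computed from the row index by a triangular-number formula.
import Mathlib
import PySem

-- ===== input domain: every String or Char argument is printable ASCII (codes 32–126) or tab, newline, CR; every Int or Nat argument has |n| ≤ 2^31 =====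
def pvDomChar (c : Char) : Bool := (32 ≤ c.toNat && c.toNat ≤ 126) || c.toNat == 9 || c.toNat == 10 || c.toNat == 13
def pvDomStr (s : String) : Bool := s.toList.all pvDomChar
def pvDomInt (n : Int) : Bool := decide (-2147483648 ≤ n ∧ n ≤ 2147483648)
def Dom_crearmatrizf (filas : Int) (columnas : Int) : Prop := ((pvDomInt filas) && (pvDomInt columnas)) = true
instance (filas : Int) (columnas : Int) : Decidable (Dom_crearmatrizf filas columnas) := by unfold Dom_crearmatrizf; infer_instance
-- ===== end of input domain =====

-- B replaces A's zero-initialisation pass, shared counter and negative-index while-loop by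
-- building each row wholesale from a closed-form start value (objective: simpler).

-- ===== PORT A =====
-- A's inner 'while c >= columnas*-1' loop; matriz[f][c]=aux is pySetD (negative index).
def pvWhile (row : List Int) (aux : Int) (c : Int) (columnas : Int) (fp1 : Int) :
    List Int × Int :=
  if c ≥ columnas * -1 then
    if |c| ≤ fp1 then
      pvWhile (PySem.List.pySetD row c aux) (aux + 1) (c - 1) columnas fp1
    else
      pvWhile row aux (c - 1) columnas fp1
  else (row, aux)
termination_by (c + columnas + 1).toNat
decreasing_by all_goals omega

def crearmatrizf (filas : Int) (columnas : Int) : List (List Int) :=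
  let matriz := (PySem.List.pyRange 0 filas 1).foldl
    (fun m _ => m ++ [List.replicate columnas.toNat (0 : Int)]) []
  ((PySem.List.pyRange 0 filas 1).foldl
    (fun (st : List (List Int) × Int) f =>
      let p := pvWhile (PySem.List.pyGetD st.1 f []) st.2 (-1) columnas (f + 1)
      (PySem.List.pySetD st.1 f p.1, p.2))
    (matriz, 1)).1

-- ===== PORT B =====
def pvFila (columnas : Int) (f : Int) : List Int :=
  let k := if f < columnas then f + 1 else columnas
  let start := if f < columnas then 1 + PySem.Int.floordiv (f * (f + 1)) 2
    else 1 + PySem.Int.floordiv (columnas * (columnas + 1)) 2 + (f - columnas) * columnas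
  List.replicate (columnas - k).toNat (0 : Int) ++
    PySem.List.pyRange (start + k - 1) (start - 1) (-1)

def crearmatrizf_alt (filas : Int) (columnas : Int) : List (List Int) :=
  if columnas ≤ 0 then (PySem.List.pyRange 0 filas 1).map (fun _ => [])
  else (PySem.List.pyRange 0 filas 1).map (pvFila columnas)

-- ===== PRECONDITION & SPEC =====
def Spec_crearmatrizf (filas : Int) (columnas : Int) (out : List (List Int)) : Prop := out = crearmatrizf_alt filas columnas
instance (filas : Int) (columnas : Int) (out : List (List Int)) : Decidable (Spec_crearmatrizf filas columnas out) := by unfold Spec_crearmatrizf; infer_instance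

-- ===== CLAIM (what is proved, stated in full; the proofs are below) =====
def Claim_equal_crearmatrizf : Prop := ∀ (filas : Int) (columnas : Int), Dom_crearmatrizf filas columnas → Spec_crearmatrizf filas columnas (crearmatrizf filas columnas)

-- ===== LEMMAS AND PROOFS =====

-- descending run [v, v-1, …, v-n+1]
def pvDescL (v : Int) : Nat → List Int
  | 0 => []
  | n + 1 => v :: pvDescL (v - 1) n

lemma pvDescL_snoc (n : Nat) : ∀ v : Int, pvDescL v (n + 1) = pvDescL v n ++ [v - n] := by
  induction n with
  | zero => intro v; simp [pvDescL]
  | succ n ih =>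
      intro v
      show v :: pvDescL (v - 1) (n + 1) = (v :: pvDescL (v - 1) n) ++ [v - ((n : Int) + 1)]
      rw [ih (v - 1), List.cons_append]
      have : v - 1 - (n : Int) = v - ((n : Int) + 1) := by ring
      rw [this]

lemma pyRange_descL (n : Nat) : ∀ v : Int, PySem.List.pyRange v (v - n) (-1) = pvDescL v n := by
  induction n with
  | zero => intro v; simp [PySem.List.pyRange_neg_one_eq_nil, pvDescL]
  | succ n ih =>
      intro v
      rw [PySem.List.pyRange_neg_one_cons (by omega), pvDescL]
      have : v - (n + 1 : Nat) = (v - 1) - n := by push_cast; ring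
      rw [this, ih (v - 1)]

lemma pySetD_neg (xs : List Int) (c v : Int) (h1 : -(xs.length : Int) ≤ c) (h2 : c < 0) :
    PySem.List.pySetD xs c v = xs.set ((xs.length : Int) + c).toNat v := by
  simp [PySem.List.pySetD, PySem.List.pySet?, PySem.List.pyIdx?]
  rw [if_neg (by omega : ¬ (0 ≤ c)), if_pos h1]
  simp
  congr 1
  omega

lemma pvWhile_skip (cols fp1 : Int) :
    ∀ (n : Nat) (c : Int), (c + cols + 1).toNat ≤ n → c < 0 → fp1 < -c →
    ∀ (row : List Int) (aux : Int), pvWhile row aux c cols fp1 = (row, aux) := by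
  intro n
  induction n with
  | zero =>
      intro c hn hc hf row aux
      rw [pvWhile]
      rw [if_neg (by omega : ¬ (c ≥ cols * -1))]
  | succ n ih =>
      intro c hn hc hf row aux
      rw [pvWhile]
      by_cases h : c ≥ cols * -1
      · have habs : ¬ (|c| ≤ fp1) := by
          rw [abs_of_neg hc]; omega
        rw [if_pos h, if_neg habs]
        exact ih (c - 1) (by omega) (by omega) (by omega) row aux
      · rw [if_neg h]

lemma pvWhile_fill (cols fp1 : Int) (hcols : 0 < cols) :
    ∀ (n : Nat) (c : Int), (c + cols + 1).toNat ≤ n → -cols ≤ c → c < 0 → -c ≤ fp1 →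
    ∀ (row : List Int) (aux : Int), (row.length : Int) = cols →
    pvWhile row aux c cols fp1 =
      (row.take (cols - min fp1 cols).toNat ++
         pvDescL (aux + (min fp1 cols + c)) (min fp1 cols + c + 1).toNat ++
         row.drop (cols + c + 1).toNat,
       aux + (min fp1 cols + c + 1)) := by
  intro n
  induction n with
  | zero => intro c hn h1 h2 h3 row aux hlen; omega
  | succ n ih =>
      intro c hn h1 h2 h3 row aux hlen
      rw [pvWhile, if_pos (by omega : c ≥ cols * -1),
        if_pos (by rw [abs_of_neg h2]; omega : |c| ≤ fp1),
        pySetD_neg row c aux (by omega) h2]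
      set k := min fp1 cols with hk
      have hkc : -c ≤ k := by omega
      set j : Nat := ((row.length : Int) + c).toNat with hj
      have hjc : (j : Int) = cols + c := by omega
      have hjlt : j < row.length := by omega
      have hset := List.set_eq_take_cons_drop aux hjlt
      by_cases hcase : -cols ≤ c - 1 ∧ -(c - 1) ≤ fp1
      · rw [ih (c - 1) (by omega) hcase.1 (by omega) hcase.2 (row.set j aux) (aux + 1)
          (by simp [hlen])]
        have hkc1 : 1 ≤ k + c := by omega
        have e2 : aux + 1 + (k + (c - 1) + 1) = aux + (k + c + 1) := by ring
        have elen : (k + (c - 1) + 1).toNat = (k + c).toNat := by omega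
        have etop : aux + 1 + (k + (c - 1)) = aux + (k + c) := by ring
        rw [e2, elen, etop]
        have edrop : (cols + (c - 1) + 1).toNat = j := by omega
        have etake : (cols - k).toNat ≤ j := by omega
        have htl : (row.take j).length = j := by simp; omega
        congr 1
        rw [hset]
        rw [List.take_append_of_le_length (by omega : (cols - k).toNat ≤ (row.take j).length),
          List.take_take, Nat.min_eq_left etake, edrop]
        have hdrop : ((row.take j ++ aux :: row.drop (j + 1))).drop j = aux :: row.drop (j + 1) := by
          have h0 := List.drop_left (l₁ := row.take j) (l₂ := aux :: row.drop (j + 1))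
          rw [htl] at h0
          exact h0
        rw [hdrop]
        have em : (k + c + 1).toNat = (k + c).toNat + 1 := by omega
        rw [em, pvDescL_snoc]
        have : aux + (k + c) - ((k + c).toNat : Int) = aux := by omega
        rw [this]
        have : (cols + c + 1).toNat = j + 1 := by omega
        rw [this]
        simp
      · have hkeq : k = -c := by omega
        have hstop : pvWhile (row.set j aux) (aux + 1) (c - 1) cols fp1 = (row.set j aux, aux + 1) := by
          by_cases hb : c - 1 ≥ cols * -1
          · exact pvWhile_skip cols fp1 n (c - 1) (by omega) (by omega) (by omega) _ _
          · rw [pvWhile, if_neg hb]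
        rw [hstop, hset]
        have e2 : aux + 1 = aux + (k + c + 1) := by omega
        have e1 : (cols - k).toNat = j := by omega
        have eL : (k + c + 1).toNat = 1 := by omega
        have eT : aux + (k + c) = aux := by omega
        have eD : (cols + c + 1).toNat = j + 1 := by omega
        rw [← e2, e1, eL, eT, eD]
        simp [pvDescL]

lemma pvWhile_row (cols f aux : Int) (hcols : 0 < cols) (hf : 0 ≤ f) :
    pvWhile (List.replicate cols.toNat 0) aux (-1) cols (f + 1) =
      (List.replicate (cols - min (f + 1) cols).toNat 0 ++
         pvDescL (aux + min (f + 1) cols - 1) (min (f + 1) cols).toNat,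
       aux + min (f + 1) cols) := by
  have hlen : ((List.replicate cols.toNat (0 : Int)).length : Int) = cols := by simp; omega
  rw [pvWhile_fill cols (f + 1) hcols (cols.toNat) (-1) (by omega) (by omega) (by omega)
    (by omega) _ aux hlen]
  set k := min (f + 1) cols with hk
  have hk1 : 1 ≤ k := by omega
  have e1 : k + -1 + 1 = k := by ring
  have e2 : aux + (k + -1) = aux + k - 1 := by ring
  rw [e1, e2]
  congr 1
  rw [List.take_replicate, List.drop_replicate]
  have e3 : min (cols - k).toNat cols.toNat = (cols - k).toNat := by omega
  have e4 : cols.toNat - (cols + -1 + 1).toNat = 0 := by omega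
  rw [e3, e4]
  simp

def pvStart (cols f : Int) : Int :=
  if f < cols then 1 + PySem.Int.floordiv (f * (f + 1)) 2
  else 1 + PySem.Int.floordiv (cols * (cols + 1)) 2 + (f - cols) * cols

lemma pvStart_zero (cols : Int) (h : 0 < cols) : pvStart cols 0 = 1 := by
  simp [pvStart, h, PySem.Int.floordiv_eq_ediv_of_pos (by omega : (0:Int) < 2)]

lemma floordiv_two_double (q : Int) : PySem.Int.floordiv (q + q) 2 = q := by
  rw [PySem.Int.floordiv_eq_ediv_of_pos (by omega : (0:Int) < 2)]
  have : q + q = 2 * q := by ring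
  rw [this, Int.mul_ediv_cancel_left q (by norm_num)]

lemma pvStart_succ (cols f : Int) (h : 0 < cols) (hf : 0 ≤ f) :
    pvStart cols (f + 1) = pvStart cols f + min (f + 1) cols := by
  obtain ⟨q, hq⟩ := Int.even_mul_succ_self f
  obtain ⟨r, hr⟩ := Int.even_mul_succ_self (f + 1)
  unfold pvStart
  by_cases h1 : f + 1 < cols
  · have h2 : f < cols := by omega
    rw [if_pos h1, if_pos h2, hq, hr, floordiv_two_double, floordiv_two_double]
    have : (f+1) * (f+1+1) = f * (f+1) + 2*(f+1) := by ring
    omega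
  · by_cases h2 : f < cols
    · have hcf : cols = f + 1 := by omega
      rw [if_neg h1, if_pos h2, hq, floordiv_two_double, hcf]
      obtain ⟨s, hs⟩ := Int.even_mul_succ_self (f + 1)
      rw [hs, floordiv_two_double]
      have : (f+1) * (f+1+1) = f * (f+1) + 2*(f+1) := by ring
      omega
    · rw [if_neg h1, if_neg h2]
      have : (f + 1 - cols) * cols = (f - cols) * cols + cols := by ring
      omega

lemma pvFila_eq (cols f : Int) (h : 0 < cols) (hf : 0 ≤ f) :
    pvFila cols f =
      List.replicate (cols - min (f + 1) cols).toNat 0 ++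
        pvDescL (pvStart cols f + min (f + 1) cols - 1) (min (f + 1) cols).toNat := by
  unfold pvFila pvStart
  by_cases hb : f < cols
  · have hm : min (f + 1) cols = f + 1 := by omega
    simp only [if_pos hb, hm]
    set s := 1 + PySem.Int.floordiv (f * (f + 1)) 2 with hs
    congr 1
    have e : s - 1 = (s + (f + 1) - 1) - ((f + 1).toNat : Int) := by omega
    rw [e, pyRange_descL]
  · have hm : min (f + 1) cols = cols := by omega
    simp only [if_neg hb, hm]
    set s := 1 + PySem.Int.floordiv (cols * (cols + 1)) 2 + (f - cols) * cols with hs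
    congr 1
    have e : s - 1 = (s + cols - 1) - (cols.toNat : Int) := by omega
    rw [e, pyRange_descL]

lemma foldl_build (l : List Int) (r : List Int) :
    ∀ init : List (List Int), l.foldl (fun m (_ : Int) => m ++ [r]) init =
      init ++ List.replicate l.length r := by
  induction l with
  | nil => intro init; simp
  | cons x xs ih =>
      intro init
      simp only [List.foldl_cons, List.length_cons, ih, List.replicate_succ,
        List.append_assoc, List.singleton_append]

lemma pvNilRow_fold (cols : Int) (hc : cols ≤ 0) (nr : Nat) :
    ∀ (l : List Int) (a : Int),
      l.foldl (fun (st : List (List Int) × Int) f =>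
          let p := pvWhile (PySem.List.pyGetD st.1 f []) st.2 (-1) cols (f + 1)
          (PySem.List.pySetD st.1 f p.1, p.2))
        (List.replicate nr [], a) = (List.replicate nr [], a) := by
  intro l
  induction l with
  | nil => intro a; simp
  | cons x xs ih =>
      intro a
      simp only [List.foldl_cons]
      have hw : ∀ row aux, pvWhile row aux (-1) cols (x + 1) = (row, aux) := by
        intro row aux
        rw [pvWhile, if_neg (by omega : ¬ ((-1 : Int) ≥ cols * -1))]
      have hget : PySem.List.pyGetD (List.replicate nr ([] : List Int)) x [] = [] := by
        simp only [PySem.List.pyGetD, PySem.List.pyGet?, List.length_replicate]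
        cases hi : PySem.List.pyIdx? nr x with
        | none => simp [hi]
        | some k =>
            simp [hi, List.getElem?_replicate]
            split <;> simp
      have hset : PySem.List.pySetD (List.replicate nr ([] : List Int)) x [] =
          List.replicate nr [] := by
        simp only [PySem.List.pySetD, PySem.List.pySet?, List.length_replicate]
        cases hi : PySem.List.pyIdx? nr x with
        | none => simp [hi]
        | some k => simp [hi, List.set_replicate_self]
      simp only [hw, hget, hset]
      exact ih a

lemma pvOuter (filas cols : Int) (h : 0 < cols) :
    ∀ (j : Nat), (j : Int) ≤ filas →
    (PySem.List.pyRange 0 (j : Int) 1).foldl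
      (fun (st : List (List Int) × Int) f =>
        let p := pvWhile (PySem.List.pyGetD st.1 f []) st.2 (-1) cols (f + 1)
        (PySem.List.pySetD st.1 f p.1, p.2))
      (List.replicate filas.toNat (List.replicate cols.toNat 0), 1)
    = ((PySem.List.pyRange 0 (j : Int) 1).map (pvFila cols) ++
        List.replicate (filas.toNat - j) (List.replicate cols.toNat 0), pvStart cols j) := by
  intro j
  induction j with
  | zero =>
      intro _
      rw [PySem.List.pyRange_one_eq_nil (by omega)]
      simp [pvStart_zero cols h]
  | succ j ih =>
      intro hj
      have hj' : (j : Int) ≤ filas := by push_cast at hj ⊢; omega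
      have hcast : ((j + 1 : Nat) : Int) = (j : Int) + 1 := by push_cast; ring
      rw [hcast, PySem.List.pyRange_one_succ_right (by omega : (0 : Int) ≤ (j : Int)),
        List.foldl_append, ih hj']
      simp only [List.foldl_cons, List.foldl_nil]
      have hlenm : ((PySem.List.pyRange 0 (j : Int) 1).map (pvFila cols)).length = j := by
        simp [PySem.List.length_pyRange_one]
      have hrest : filas.toNat - j = (filas.toNat - j - 1) + 1 := by
        push_cast at hj; omega
      have hget : PySem.List.pyGetD
          ((PySem.List.pyRange 0 (j : Int) 1).map (pvFila cols) ++
            List.replicate (filas.toNat - j) (List.replicate cols.toNat 0)) (j : Int) [] =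
          List.replicate cols.toNat 0 := by
        rw [PySem.List.pyGetD_natCast]
        rw [List.getD_eq_getElem?_getD, List.getElem?_append_right (by omega), hlenm]
        have : j - j = 0 := by omega
        rw [this, hrest]
        simp
      rw [hget, pvWhile_row cols (j : Int) (pvStart cols j) h (by omega)]
      rw [← pvFila_eq cols (j : Int) h (by omega)]
      rw [← pvStart_succ cols (j : Int) h (by omega)]
      rw [PySem.List.pySetD_natCast]
      have hsetidx : ((PySem.List.pyRange 0 (j : Int) 1).map (pvFila cols) ++
          List.replicate (filas.toNat - j) (List.replicate cols.toNat 0)).set j (pvFila cols j) =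
          (PySem.List.pyRange 0 (j : Int) 1).map (pvFila cols) ++
            (pvFila cols j :: List.replicate (filas.toNat - j - 1) (List.replicate cols.toNat 0)) := by
        rw [List.set_append_right _ _ (by omega), hlenm]
        have : j - j = 0 := by omega
        rw [this, hrest]
        simp [List.replicate_succ]
      rw [hsetidx]
      have : filas.toNat - (j + 1) = filas.toNat - j - 1 := by omega
      rw [this, List.map_append]
      simp

-- ===== VERDICT (by name: the statement is the Claim_ definition above) =====
theorem crearmatrizf_spec : Claim_equal_crearmatrizf := by
  intro filas cols _
  unfold Spec_crearmatrizf crearmatrizf crearmatrizf_alt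
  rw [foldl_build]
  by_cases hc : cols ≤ 0
  · rw [if_pos hc]
    have hz : cols.toNat = 0 := by omega
    rw [hz]
    simp only [List.replicate, List.nil_append]
    rw [pvNilRow_fold cols hc _ _ 1]
    simp [List.map_const']
  · rw [if_neg hc]
    by_cases hf : 0 ≤ filas
    · have hcast : ((filas.toNat : Nat) : Int) = filas := by omega
      have hout := pvOuter filas cols (by omega) filas.toNat (by omega)
      rw [hcast] at hout
      have hlen : (PySem.List.pyRange 0 filas 1).length = filas.toNat := by
        rw [PySem.List.length_pyRange_one]
        simp
      rw [List.nil_append, hlen]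
      dsimp only
      rw [hout]
      simp
    · have hnil : PySem.List.pyRange 0 filas 1 = [] :=
        PySem.List.pyRange_one_eq_nil (by omega)
      rw [hnil]
      simp
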